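-- pv_equiv track=rewrite | github.com/tgreaves/k-razy-shoot-out | create_annotated_disassembly.py | bytes_to_ascii_art
-- ===== SOURCE A (Python) =====
-- def bytes_to_ascii_art(char_data):
--     """Convert 8 bytes to ASCII art representation"""
--     if len(char_data) != 8:
--         return [""] * 8
--
--     lines = []
--     for byte_val in char_data:
--         line = ""
--         for bit in range(7, -1, -1):
--             if byte_val & (1 << bit):
--                 line += "#"
--             else:
--                 line += "."
--         lines.append(line)
--     return lines
-- ===== SOURCE B (Python) =====
-- _TRANS = str.maketrans('01', '.#')
--
--
-- def bytes_to_ascii_art(char_data):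
--     """Convert 8 bytes to ASCII art representation"""
--     if len(char_data) != 8:
--         return [""] * 8
--     return [format(b % 256, '08b').translate(_TRANS) for b in char_data]
-- ===== Notes on version B (the rewrite author's own statement) =====
-- stated objective: idiomatic
-- what changed: Replaced the nested per-bit mask-and-append loop with a per-byte string transform: format(b % 256, '08b') produces the MSB-first bit string and a str.maketrans table turns '0'/'1' into '.'/'#'.
import Mathlib
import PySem

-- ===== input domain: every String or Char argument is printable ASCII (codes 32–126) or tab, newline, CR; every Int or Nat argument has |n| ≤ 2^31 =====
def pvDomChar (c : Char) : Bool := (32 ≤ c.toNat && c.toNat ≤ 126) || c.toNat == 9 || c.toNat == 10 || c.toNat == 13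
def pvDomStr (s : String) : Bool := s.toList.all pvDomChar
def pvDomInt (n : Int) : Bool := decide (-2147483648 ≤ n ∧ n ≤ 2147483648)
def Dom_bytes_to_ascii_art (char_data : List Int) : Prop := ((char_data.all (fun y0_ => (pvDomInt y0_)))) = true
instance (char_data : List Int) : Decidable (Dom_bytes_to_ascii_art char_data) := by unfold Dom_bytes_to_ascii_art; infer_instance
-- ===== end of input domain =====

-- B renders each byte via format(b % 256, '08b') translated through the '01'→'.#' table instead of A's inner bit-mask loop (idiomatic; same cost).

-- ===== PORT A =====
def bytes_to_ascii_art (char_data : List Int) : List String :=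
  if char_data.length ≠ 8 then List.replicate 8 "" else
  char_data.foldl (fun lines byte_val =>
    lines ++ [(PySem.List.pyRange 7 (-1) (-1)).foldl
      (fun line bit =>
        line ++ (if PySem.Int.band byte_val ((1:Int) <<< bit.toNat) ≠ 0 then "#" else "."))
      ""]) []

-- ===== PORT B =====
-- format(n, '08b') for 0 ≤ n < 256: binary digits of n left-padded with '0' to width 8 (exact there)
def pvFmt08b (n : Int) : List Char :=
  let bits := PySem.Int.toBinChars n
  List.replicate (8 - bits.length) '0' ++ bits

-- the str.maketrans('01', '.#') table applied to one character
def pvTrans (c : Char) : Char := if c = '1' then '#' else if c = '0' then '.' else c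

def bytes_to_ascii_art_alt (char_data : List Int) : List String :=
  if char_data.length ≠ 8 then List.replicate 8 "" else
  char_data.map (fun b => String.ofList ((pvFmt08b (PySem.Int.mod b 256)).map pvTrans))

-- ===== PRECONDITION & SPEC =====
def Spec_bytes_to_ascii_art (char_data : List Int) (out : List String) : Prop := out = bytes_to_ascii_art_alt char_data
instance (char_data : List Int) (out : List String) : Decidable (Spec_bytes_to_ascii_art char_data out) := by unfold Spec_bytes_to_ascii_art; infer_instance

-- ===== CLAIM (what is proved, stated in full; the proofs are below) =====
def Claim_equal_bytes_to_ascii_art : Prop := ∀ (char_data : List Int), Dom_bytes_to_ascii_art char_data → Spec_bytes_to_ascii_art char_data (bytes_to_ascii_art char_data)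

-- ===== LEMMAS AND PROOFS =====

-- the low byte of b (Python's b % 256), as a Nat
def pvLowByte (b : Int) : Nat := (PySem.Int.mod b 256).toNat

theorem pvMod_eq_lowByte (b : Int) : PySem.Int.mod b 256 = (pvLowByte b : Int) := by
  have h : (0:Int) ≤ b.fmod 256 := by
    simp [Int.fmod_eq_emod]
    exact Int.emod_nonneg b (by norm_num)
  simp [PySem.Int.mod, pvLowByte, h]

theorem pvLowByte_lt (b : Int) : pvLowByte b < 256 := by
  have h : b.fmod 256 < 256 := by
    simp [Int.fmod_eq_emod]
    exact Int.emod_lt_of_pos b (by norm_num)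
  simp only [pvLowByte, PySem.Int.mod]
  omega

-- Python's truthiness of b & (1 << i) is bit i of the low byte (i < 8)
theorem pvBand_bit_iff (b : Int) (i : Nat) (h : i < 8) :
    (PySem.Int.band b ((1:Int) <<< (i:Int)) ≠ 0) ↔ Nat.testBit (pvLowByte b) i := by
  have hsh : (1:Int) <<< (i:Int) = ((2^i : Nat) : Int) := by
    have : ((1:Nat) : Int) <<< (i:Int) = (((1 <<< i : Nat)) : Int) := Int.shiftLeft_natCast 1 i
    simpa [Nat.shiftLeft_eq] using this
  have hlow : pvLowByte b = (b.emod 256).toNat := by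
    simp [pvLowByte, PySem.Int.mod, Int.fmod_eq_emod]
    rfl
  have h256 : (256:Nat) = 2^8 := rfl
  by_cases hb : 0 ≤ b
  case pos =>
    obtain ⟨m, rfl⟩ := Int.eq_ofNat_of_zero_le hb
    have hband : PySem.Int.band (m : Int) ((1:Int) <<< (i:Int)) = ((m &&& 2^i : Nat) : Int) := by
      rw [hsh]; exact_mod_cast PySem.Int.band_natCast m (2^i)
    have hlow2 : pvLowByte (m : Int) = m % 256 := by
      rw [hlow]; norm_cast
    rw [hband, hlow2, h256, Nat.testBit_mod_two_pow]
    simp only [Nat.and_two_pow, h, decide_true, Bool.true_and]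
    cases ht : m.testBit i <;> simp
  case neg =>
    obtain ⟨m, rfl⟩ : ∃ m : Nat, b = -((m:Int)+1) := ⟨(-b-1).toNat, by omega⟩
    have hmm : (-(-((m:Int)+1)) - 1).toNat = m := by omega
    have hband : PySem.Int.band (-((m:Int)+1)) ((1:Int) <<< (i:Int))
        = ((2^i - (m &&& 2^i) : Nat) : Int) := by
      rw [hsh]
      simp only [PySem.Int.band]
      rw [if_neg (by omega), if_pos (by positivity), hmm, Int.toNat_natCast, Nat.land_comm]
    have hlow2 : pvLowByte (-((m:Int)+1)) = 2^8 - (m % 256 + 1) := by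
      rw [hlow]
      have he : (-((m:Int)+1)).emod 256 = (-((m:Int)+1)) % 256 := rfl
      rw [he]
      have h4 : m % 256 < 256 := Nat.mod_lt _ (by norm_num)
      omega
    rw [hband, hlow2]
    have hx : m % 256 < 2^8 := Nat.mod_lt _ (by norm_num)
    rw [Nat.testBit_two_pow_sub_succ hx, h256, Nat.testBit_mod_two_pow]
    simp only [h, decide_true, Bool.true_and]
    have hle : m &&& 2^i ≤ 2^i := by rw [Nat.and_two_pow]; cases m.testBit i <;> simp
    cases ht : m.testBit i <;>
      simp only [Nat.and_two_pow, ht, Bool.toNat_true, Bool.toNat_false, one_mul, zero_mul,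
        Bool.not_true, Bool.not_false] <;>
      simp

-- evaluation of B's per-byte line on each byte value
set_option maxRecDepth 4096 in
theorem pvLineB_eval : ∀ n : Nat, n < 256 →
    ((pvFmt08b (n : Int)).map pvTrans)
      = [if n.testBit 7 then '#' else '.', if n.testBit 6 then '#' else '.',
         if n.testBit 5 then '#' else '.', if n.testBit 4 then '#' else '.',
         if n.testBit 3 then '#' else '.', if n.testBit 2 then '#' else '.',
         if n.testBit 1 then '#' else '.', if n.testBit 0 then '#' else '.'] := by
  decide

theorem pvRangeLit : PySem.List.pyRange 7 (-1) (-1) = [7,6,5,4,3,2,1,0] := by decide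

theorem pvBuild (b7 b6 b5 b4 b3 b2 b1 b0 : Bool) :
    ("" ++ (if b7 then "#" else ".") ++ (if b6 then "#" else ".") ++ (if b5 then "#" else ".")
        ++ (if b4 then "#" else ".") ++ (if b3 then "#" else ".") ++ (if b2 then "#" else ".")
        ++ (if b1 then "#" else ".") ++ (if b0 then "#" else "."))
      = String.ofList [if b7 then '#' else '.', if b6 then '#' else '.', if b5 then '#' else '.',
         if b4 then '#' else '.', if b3 then '#' else '.', if b2 then '#' else '.',
         if b1 then '#' else '.', if b0 then '#' else '.'] := by
  cases b7 <;> cases b6 <;> cases b5 <;> cases b4 <;> cases b3 <;> cases b2 <;> cases b1 <;>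
    cases b0 <;> rfl

-- A's inner bit loop equals B's per-byte transform
theorem pvByte_eq (b : Int) :
    (PySem.List.pyRange 7 (-1) (-1)).foldl
      (fun line bit =>
        line ++ (if PySem.Int.band b ((1:Int) <<< bit.toNat) ≠ 0 then "#" else "."))
      ""
    = String.ofList ((pvFmt08b (PySem.Int.mod b 256)).map pvTrans) := by
  rw [pvRangeLit, pvMod_eq_lowByte b, pvLineB_eval (pvLowByte b) (pvLowByte_lt b)]
  simp only [List.foldl]
  have e7 : ((7:Int).toNat) = 7 := rfl
  have e6 : ((6:Int).toNat) = 6 := rfl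
  have e5 : ((5:Int).toNat) = 5 := rfl
  have e4 : ((4:Int).toNat) = 4 := rfl
  have e3 : ((3:Int).toNat) = 3 := rfl
  have e2 : ((2:Int).toNat) = 2 := rfl
  have e1 : ((1:Int).toNat) = 1 := rfl
  have e0 : ((0:Int).toNat) = 0 := rfl
  simp only [e7, e6, e5, e4, e3, e2, e1, e0]
  simp only [pvBand_bit_iff b 7 (by norm_num), pvBand_bit_iff b 6 (by norm_num),
    pvBand_bit_iff b 5 (by norm_num), pvBand_bit_iff b 4 (by norm_num),
    pvBand_bit_iff b 3 (by norm_num), pvBand_bit_iff b 2 (by norm_num),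
    pvBand_bit_iff b 1 (by norm_num), pvBand_bit_iff b 0 (by norm_num)]
  exact pvBuild _ _ _ _ _ _ _ _

theorem pvFoldl_append_map {α β : Type} (f : α → β) (xs : List α) (acc : List β) :
    xs.foldl (fun lines x => lines ++ [f x]) acc = acc ++ xs.map f := by
  induction xs generalizing acc with
  | nil => simp
  | cons y ys ih => simp [List.foldl, ih]

-- ===== VERDICT (by name: the statement is the Claim_ definition above) =====
theorem bytes_to_ascii_art_spec : Claim_equal_bytes_to_ascii_art := by
  intro cd _
  unfold Spec_bytes_to_ascii_art bytes_to_ascii_art bytes_to_ascii_art_alt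
  split
  · rfl
  · rw [pvFoldl_append_map]
    simp only [List.nil_append]
    exact List.map_congr_left (fun b _ => pvByte_eq b)
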